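-- pv_equiv track=rewrite | github.com/sooperset/mcp-atlassian | src/mcp_atlassian/utils.py | _find_break_point
-- ===== SOURCE A (Python) =====
-- def _find_break_point(text: str, position: int) -> int:
--     """
--     Encontra um ponto adequado para quebrar o texto próximo à posição.
--     Procura por quebras de linha, parágrafos ou sentenças.
--
--     Args:
--         text: Texto a ser dividido
--         position: Posição aproximada para a quebra
--
--     Returns:
--         Posição exata para a quebra
--     """
--     # Preferência 1: quebra de parágrafo
--     for i in range(min(200, position), 0, -1):
--         check_pos = position - i
--         if check_pos >= 0 and text[check_pos:check_pos+2] == '\n\n':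
--             return check_pos + 2
--
--     # Preferência 2: quebra de linha
--     for i in range(min(200, position), 0, -1):
--         check_pos = position - i
--         if check_pos >= 0 and text[check_pos] == '\n':
--             return check_pos + 1
--
--     # Preferência 3: fim de frase
--     for i in range(min(200, position), 0, -1):
--         check_pos = position - i
--         if check_pos >= 0 and text[check_pos] in '.!?' and (check_pos + 1 >= len(text) or text[check_pos+1] == ' '):
--             return check_pos + 1
--
--     # Se não encontrou nenhum ponto ideal, retorna a posição original
--     return position
-- ===== SOURCE B (Python) =====
-- def _find_break_point(text: str, position: int) -> int:
--     # Single ascending pass over the window; a paragraph break wins immediately,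
--     # otherwise the first-seen line break and sentence end are recorded and the
--     # priority is decided after the loop. Slicing is used for the single-char
--     # reads so the scan never raises on out-of-range indices.
--     n = len(text)
--     start = position - min(200, position)
--     line_idx = None
--     sent_idx = None
--     for cp in range(start, position):
--         if text[cp:cp+2] == '\n\n':
--             return cp + 2
--         c = text[cp:cp+1]
--         if line_idx is None and c == '\n':
--             line_idx = cp
--         if sent_idx is None and c in ('.', '!', '?') and (cp + 1 >= n or text[cp+1] == ' '):
--             sent_idx = cp
--     if line_idx is not None:
--         return line_idx + 1
--     if sent_idx is not None:
--         return sent_idx + 1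
--     return position
-- ===== Notes on version B (the rewrite author's own statement) =====
-- stated objective: alternative
-- what changed: Replaced A's three sequential descending-index passes over the 200-char window by one ascending pass that returns immediately on the first paragraph break and otherwise records the first line break and first sentence end, deciding priority after the loop.
import Mathlib
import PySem

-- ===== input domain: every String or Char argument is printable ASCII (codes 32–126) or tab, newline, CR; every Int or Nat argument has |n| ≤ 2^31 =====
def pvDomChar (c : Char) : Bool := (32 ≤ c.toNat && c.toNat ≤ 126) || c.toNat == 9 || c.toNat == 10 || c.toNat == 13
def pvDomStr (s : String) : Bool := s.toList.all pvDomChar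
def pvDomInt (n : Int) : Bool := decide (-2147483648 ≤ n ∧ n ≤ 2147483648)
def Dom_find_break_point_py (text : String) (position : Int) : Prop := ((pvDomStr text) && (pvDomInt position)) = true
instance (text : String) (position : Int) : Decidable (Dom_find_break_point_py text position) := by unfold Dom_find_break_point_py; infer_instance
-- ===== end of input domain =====

-- B replaces A's three sequential descending-index window passes by one ascending pass
-- (paragraph break returns at once; the first line/sentence breaks are recorded and decided
-- after the loop); same return value on every input where A returns.
-- (A-port: pyGetD's default 'x' is only reached where Python A raises IndexError, outside Pre_.)

-- ===== PORT A =====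
-- for i in range(min(200, position), 0, -1): paragraph pass
def fbpLoopPara (cs : List Char) (position : Int) : List Int → Option Int
  | [] => none
  | i :: rest =>
    if 0 ≤ position - i ∧ PySem.List.slice cs (some (position - i)) (some (position - i + 2)) = ['\n', '\n']
    then some (position - i + 2) else fbpLoopPara cs position rest

-- line pass
def fbpLoopLine (cs : List Char) (position : Int) : List Int → Option Int
  | [] => none
  | i :: rest =>
    if 0 ≤ position - i ∧ PySem.List.pyGetD cs (position - i) 'x' = '\n'
    then some (position - i + 1) else fbpLoopLine cs position rest

-- sentence pass
def fbpLoopSent (cs : List Char) (n position : Int) : List Int → Option Int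
  | [] => none
  | i :: rest =>
    if 0 ≤ position - i ∧ PySem.List.pyGetD cs (position - i) 'x' ∈ ['.', '!', '?'] ∧
        (n ≤ position - i + 1 ∨ PySem.List.pyGetD cs (position - i + 1) 'x' = ' ')
    then some (position - i + 1) else fbpLoopSent cs n position rest

def find_break_point_py (text : String) (position : Int) : Int :=
  match fbpLoopPara text.toList position (PySem.List.pyRange (min 200 position) 0 (-1)) with
  | some r => r
  | none =>
    match fbpLoopLine text.toList position (PySem.List.pyRange (min 200 position) 0 (-1)) with
    | some r => r
    | none =>
      match fbpLoopSent text.toList (text.toList.length : Int) position (PySem.List.pyRange (min 200 position) 0 (-1)) with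
      | some r => r
      | none => position

-- ===== PORT B =====
-- single ascending pass: immediate return on paragraph break, first-seen line/sentence indices;
-- single-char reads are the slices text[cp:cp+1] of Source B (never raising)
def fbpAltLoop (cs : List Char) (n position : Int) (line? sent? : Option Int) : List Int → Int
  | [] =>
    match line? with
    | some l => l + 1
    | none =>
      match sent? with
      | some s => s + 1
      | none => position
  | cp :: rest =>
    if PySem.List.slice cs (some cp) (some (cp + 2)) = ['\n', '\n'] then cp + 2
    else
      fbpAltLoop cs n position
        (if line? = none ∧ PySem.List.slice cs (some cp) (some (cp + 1)) = ['\n'] then some cp else line?)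
        (if sent? = none ∧ PySem.List.slice cs (some cp) (some (cp + 1)) ∈ [['.'], ['!'], ['?']] ∧
            (n ≤ cp + 1 ∨ PySem.List.pyGetD cs (cp + 1) 'x' = ' ') then some cp else sent?)
        rest

def find_break_point_py_alt (text : String) (position : Int) : Int :=
  fbpAltLoop text.toList (text.toList.length : Int) position none none
    (PySem.List.pyRange (position - min 200 position) position 1)

-- ===== PRECONDITION & SPEC =====
-- Pre_ is exactly where Python A returns: it excludes only the inputs on which A raises
-- IndexError (position > len(text) with neither a '\n\n' pair nor an in-bounds '\n' in the
-- window — there text[check_pos] with check_pos ≥ len(text) is reached).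
def Pre_find_break_point_py (text : String) (position : Int) : Prop :=
  position ≤ (text.toList.length : Int) ∨
    ['\n', '\n'] <:+: PySem.List.slice text.toList (some (position - min 200 position)) (some (position + 1)) ∨
    '\n' ∈ PySem.List.slice text.toList (some (position - min 200 position)) (some position)
instance (text : String) (position : Int) : Decidable (Pre_find_break_point_py text position) := by
  unfold Pre_find_break_point_py; infer_instance

def pvWitness_find_break_point_py : String × Int := ("ab. cd\nef", 8)

def Spec_find_break_point_py (text : String) (position : Int) (out : Int) : Prop := out = find_break_point_py_alt text position
instance (text : String) (position : Int) (out : Int) : Decidable (Spec_find_break_point_py text position out) := by unfold Spec_find_break_point_py; infer_instance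

-- ===== CLAIM (what is proved, stated in full; the proofs are below) =====
def Claim_equal_find_break_point_py : Prop := ∀ (text : String) (position : Int), Dom_find_break_point_py text position → Pre_find_break_point_py text position → Spec_find_break_point_py text position (find_break_point_py text position)

-- ===== LEMMAS AND PROOFS =====

-- the three break conditions of A, as Bool predicates on a window index
def pPara (cs : List Char) (cp : Int) : Bool :=
  decide (PySem.List.slice cs (some cp) (some (cp + 2)) = ['\n', '\n'])
def pLine (cs : List Char) (cp : Int) : Bool :=
  decide (PySem.List.pyGetD cs cp 'x' = '\n')
def pSent (cs : List Char) (n cp : Int) : Bool :=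
  decide (PySem.List.pyGetD cs cp 'x' ∈ ['.', '!', '?'] ∧
    (n ≤ cp + 1 ∨ PySem.List.pyGetD cs (cp + 1) 'x' = ' '))
-- B's slice-based forms of the line/sentence conditions
def pLineB (cs : List Char) (cp : Int) : Bool :=
  decide (PySem.List.slice cs (some cp) (some (cp + 1)) = ['\n'])
def pSentB (cs : List Char) (n cp : Int) : Bool :=
  decide (PySem.List.slice cs (some cp) (some (cp + 1)) ∈ [['.'], ['!'], ['?']] ∧
    (n ≤ cp + 1 ∨ PySem.List.pyGetD cs (cp + 1) 'x' = ' '))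

lemma slice_one_eq (cs : List Char) (cp : Int) (h : 0 ≤ cp) :
    PySem.List.slice cs (some cp) (some (cp + 1)) = (cs.drop cp.toNat).take 1 := by
  obtain ⟨k, rfl⟩ : ∃ k : ℕ, cp = (k : Int) := ⟨cp.toNat, (Int.toNat_of_nonneg h).symm⟩
  rw [show ((k : Int) + 1) = ((k : Int) + ((1 : ℕ) : Int)) by push_cast; ring,
    PySem.List.slice_natCast_add]
  simp

lemma pLineB_eq (cs : List Char) (cp : Int) (h : 0 ≤ cp) : pLineB cs cp = pLine cs cp := by
  obtain ⟨k, rfl⟩ : ∃ k : ℕ, cp = (k : Int) := ⟨cp.toNat, (Int.toNat_of_nonneg h).symm⟩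
  unfold pLineB pLine
  rw [slice_one_eq cs k h]; simp only [Int.toNat_natCast]
  rcases Decidable.em (k < cs.length) with hlt | hge
  · have h1 : List.take 1 (List.drop k cs) = [cs[k]] := by
      rw [List.drop_eq_getElem_cons hlt]; rfl
    have h2 : PySem.List.pyGetD cs (k : Int) 'x' = cs[k] := by
      simp [PySem.List.pyGetD_natCast, List.getD, List.getElem?_eq_getElem hlt]
    simp [h1, h2]
  · have h1 : List.drop k cs = [] := List.drop_eq_nil_of_le (by omega)
    have h2 : PySem.List.pyGetD cs (k : Int) 'x' = 'x' := by
      simp [PySem.List.pyGetD_natCast, List.getD, List.getElem?_eq_none (by omega : cs.length ≤ k)]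
    simp [h1, h2]

lemma pSentB_eq (cs : List Char) (n cp : Int) (h : 0 ≤ cp) : pSentB cs n cp = pSent cs n cp := by
  obtain ⟨k, rfl⟩ : ∃ k : ℕ, cp = (k : Int) := ⟨cp.toNat, (Int.toNat_of_nonneg h).symm⟩
  unfold pSentB pSent
  rw [slice_one_eq cs k h]; simp only [Int.toNat_natCast]
  rcases Decidable.em (k < cs.length) with hlt | hge
  · have h1 : List.take 1 (List.drop k cs) = [cs[k]] := by
      rw [List.drop_eq_getElem_cons hlt]; rfl
    have h2 : PySem.List.pyGetD cs (k : Int) 'x' = cs[k] := by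
      simp [PySem.List.pyGetD_natCast, List.getD, List.getElem?_eq_getElem hlt]
    simp [h1, h2]
  · have h1 : List.drop k cs = [] := List.drop_eq_nil_of_le (by omega)
    have h2 : PySem.List.pyGetD cs (k : Int) 'x' = 'x' := by
      simp [PySem.List.pyGetD_natCast, List.getD, List.getElem?_eq_none (by omega : cs.length ≤ k)]
    simp [h1, h2]

lemma find?_congr_mem {α : Type} (p q : α → Bool) (L : List α)
    (h : ∀ x ∈ L, p x = q x) : L.find? p = L.find? q := by
  induction L with
  | nil => rfl
  | cons x rest ih =>
    rcases hx : q x with _ | _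
    · rw [List.find?_cons_of_neg (by rw [h x (by simp), hx]; simp),
        List.find?_cons_of_neg (by rw [hx]; simp), ih (fun y hy => h y (by simp [hy]))]
    · rw [List.find?_cons_of_pos (by rw [h x (by simp), hx]), List.find?_cons_of_pos hx]

lemma loopPara_eq (cs : List Char) (position : Int) (L : List Int)
    (h : ∀ i ∈ L, 0 ≤ position - i) :
    fbpLoopPara cs position L
      = ((L.map (fun i => position - i)).find? (pPara cs)).map (fun cp => cp + 2) := by
  induction L with
  | nil => rfl
  | cons i rest ih =>
    have h0 : 0 ≤ position - i := h i (by simp)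
    simp only [fbpLoopPara, List.map_cons]
    by_cases hp : PySem.List.slice cs (some (position - i)) (some (position - i + 2)) = ['\n', '\n']
    · rw [if_pos ⟨h0, hp⟩, List.find?_cons_of_pos (by simp [pPara, hp])]; rfl
    · rw [if_neg (by tauto), List.find?_cons_of_neg (by simp [pPara, hp]),
        ih (fun j hj => h j (by simp [hj]))]

lemma loopLine_eq (cs : List Char) (position : Int) (L : List Int)
    (h : ∀ i ∈ L, 0 ≤ position - i) :
    fbpLoopLine cs position L
      = ((L.map (fun i => position - i)).find? (pLine cs)).map (fun cp => cp + 1) := by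
  induction L with
  | nil => rfl
  | cons i rest ih =>
    have h0 : 0 ≤ position - i := h i (by simp)
    simp only [fbpLoopLine, List.map_cons]
    by_cases hp : PySem.List.pyGetD cs (position - i) 'x' = '\n'
    · rw [if_pos ⟨h0, hp⟩, List.find?_cons_of_pos (by simp [pLine, hp])]; rfl
    · rw [if_neg (by tauto), List.find?_cons_of_neg (by simp [pLine, hp]),
        ih (fun j hj => h j (by simp [hj]))]

lemma loopSent_eq (cs : List Char) (n position : Int) (L : List Int)
    (h : ∀ i ∈ L, 0 ≤ position - i) :
    fbpLoopSent cs n position L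
      = ((L.map (fun i => position - i)).find? (pSent cs n)).map (fun cp => cp + 1) := by
  induction L with
  | nil => rfl
  | cons i rest ih =>
    have h0 : 0 ≤ position - i := h i (by simp)
    simp only [fbpLoopSent, List.map_cons]
    by_cases hp : PySem.List.pyGetD cs (position - i) 'x' ∈ ['.', '!', '?'] ∧
        (n ≤ position - i + 1 ∨ PySem.List.pyGetD cs (position - i + 1) 'x' = ' ')
    · rw [if_pos ⟨h0, hp⟩, List.find?_cons_of_pos (by simp [pSent]; simpa using hp)]; rfl
    · rw [if_neg (by tauto), List.find?_cons_of_neg (by simp [pSent]; simp at hp; tauto),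
        ih (fun j hj => h j (by simp [hj]))]

-- pushing one step of B's first-seen bookkeeping into Option.or of a find?
lemma or_step (p : Int → Bool) (o : Option Int) (cp : Int) (rest : List Int) :
    (if o = none ∧ p cp = true then some cp else o).or (rest.find? p)
      = o.or ((cp :: rest).find? p) := by
  cases o with
  | some l => simp
  | none =>
    by_cases hp : p cp = true
    · rw [List.find?_cons_of_pos hp]; simp [hp]
    · rw [List.find?_cons_of_neg (by simpa using hp)]; simp [hp]

lemma altLoop_eq (cs : List Char) (n position : Int) (L : List Int) :
    ∀ line? sent? : Option Int,
    fbpAltLoop cs n position line? sent? L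
      = match L.find? (pPara cs) with
        | some cp => cp + 2
        | none =>
          match line?.or (L.find? (pLineB cs)) with
          | some l => l + 1
          | none =>
            match sent?.or (L.find? (pSentB cs n)) with
            | some s => s + 1
            | none => position := by
  induction L with
  | nil => intro line? sent?; cases line? <;> cases sent? <;> rfl
  | cons cp rest ih =>
    intro line? sent?
    simp only [fbpAltLoop]
    by_cases hp : PySem.List.slice cs (some cp) (some (cp + 2)) = ['\n', '\n']
    · rw [if_pos hp, List.find?_cons_of_pos (by simp [pPara, hp])]
    · have e1 : (if line? = none ∧ PySem.List.slice cs (some cp) (some (cp + 1)) = ['\n'] then some cp else line?)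
          = (if line? = none ∧ pLineB cs cp = true then some cp else line?) :=
        if_congr (by simp [pLineB]) rfl rfl
      have e2 : (if sent? = none ∧ PySem.List.slice cs (some cp) (some (cp + 1)) ∈ [['.'], ['!'], ['?']] ∧
              (n ≤ cp + 1 ∨ PySem.List.pyGetD cs (cp + 1) 'x' = ' ') then some cp else sent?)
          = (if sent? = none ∧ pSentB cs n cp = true then some cp else sent?) :=
        if_congr (by simp [pSentB]; try tauto) rfl rfl
      rw [if_neg hp, e1, e2, ih, List.find?_cons_of_neg (by simp [pPara, hp]),
        or_step (pLineB cs), or_step (pSentB cs n)]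

lemma window_eq (position : Int) :
    (PySem.List.pyRange (min 200 position) 0 (-1)).map (fun i => position - i)
      = PySem.List.pyRange (position - min 200 position) position 1 := by
  rw [PySem.List.pyRange_neg_one, PySem.List.pyRange_one, List.map_map]
  rw [show (min 200 position - 0).toNat = (position - (position - min 200 position)).toNat by omega]
  exact List.map_congr_left (fun k _ => by simp [Function.comp]; ring)

lemma window_nonneg (position : Int) :
    ∀ i ∈ PySem.List.pyRange (min 200 position) 0 (-1), 0 ≤ position - i := by
  intro i hi
  rw [PySem.List.mem_pyRange_neg_one] at hi
  omega

lemma windowB_nonneg (position : Int) :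
    ∀ cp ∈ PySem.List.pyRange (position - min 200 position) position 1, 0 ≤ cp := by
  intro cp hcp
  rw [PySem.List.mem_pyRange_one] at hcp
  omega

-- ===== VERDICT (by name: the statement is the Claim_ definition above) =====
theorem find_break_point_py_spec : Claim_equal_find_break_point_py := by
  intro text position _ _
  unfold Spec_find_break_point_py find_break_point_py find_break_point_py_alt
  rw [loopPara_eq _ _ _ (window_nonneg position),
      loopLine_eq _ _ _ (window_nonneg position),
      loopSent_eq _ _ _ _ (window_nonneg position),
      window_eq, altLoop_eq,
      find?_congr_mem (pLineB text.toList) (pLine text.toList) _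
        (fun cp hcp => pLineB_eq _ _ (windowB_nonneg position cp hcp)),
      find?_congr_mem (pSentB text.toList _) (pSent text.toList _) _
        (fun cp hcp => pSentB_eq _ _ _ (windowB_nonneg position cp hcp))]
  cases (PySem.List.pyRange (position - min 200 position) position 1).find? (pPara text.toList) <;>
    cases (PySem.List.pyRange (position - min 200 position) position 1).find? (pLine text.toList) <;>
    cases (PySem.List.pyRange (position - min 200 position) position 1).find? (pSent text.toList (text.toList.length : Int)) <;>
    simp
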